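-- pv_equiv track=rewrite | github.com/Duke-Python/CPS101-APTs | UniqueZoo.py | numberUnique
-- ===== SOURCE A (Python) =====
-- def createSet(zoos, ind):
--
--     retval = set()
--     for i in range(len(zoos)):
--         if i != ind:
--             retval = retval.union(zoos[i].split(" "))
--
--     return retval
--
-- def numberUnique(zoos):
--
--     count = 0
--     for i in range(len(zoos)):
--
--         test_set = createSet(zoos, i)
--
--         temp_set = test_set.union(zoos[i].split(" "))
--         if len(test_set) != len(temp_set):
--             count = count + 1
--
--     return count
-- ===== SOURCE B (Python) =====
-- def numberUnique(zoos):
--     counts = {}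
--     for z in zoos:
--         for a in set(z.split(" ")):
--             counts[a] = counts.get(a, 0) + 1
--     total = 0
--     for z in zoos:
--         if any(counts[a] == 1 for a in z.split(" ")):
--             total += 1
--     return total
-- ===== Notes on version B (the rewrite author's own statement) =====
-- stated objective: faster
-- what changed: Instead of rebuilding the set of all other zoos' animals for every zoo and comparing set sizes, B makes one global pass counting, per animal, the number of zoos containing it, then counts the zoos that have an animal with count 1.
import Mathlib
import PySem

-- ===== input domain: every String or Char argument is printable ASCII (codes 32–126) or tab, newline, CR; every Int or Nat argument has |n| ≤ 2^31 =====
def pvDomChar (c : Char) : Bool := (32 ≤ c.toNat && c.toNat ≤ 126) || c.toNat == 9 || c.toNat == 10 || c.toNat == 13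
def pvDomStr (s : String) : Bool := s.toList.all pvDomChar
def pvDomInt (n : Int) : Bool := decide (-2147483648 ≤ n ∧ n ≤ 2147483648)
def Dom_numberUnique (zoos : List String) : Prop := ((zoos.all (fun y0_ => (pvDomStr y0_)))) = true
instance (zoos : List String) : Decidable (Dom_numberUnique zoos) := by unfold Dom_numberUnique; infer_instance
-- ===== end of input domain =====

-- B replaces A's quadratic rebuild of "all other zoos' animals" per zoo by one global pass that
-- counts, per animal, in how many zoos it occurs, then scans each zoo for an animal of count 1.

-- z.split(" "): the separator " " is the non-empty literal, so Str.split? is always `some` and getD [] is exact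
def pvSplit (z : String) : List String := (PySem.Str.split? z " ").getD []

-- ===== PORT A =====
def createSet (zoos : List String) (ind : Int) : PySem.Set String :=
  (PySem.List.pyRange 0 (PySem.List.len zoos)).foldl
    (fun retval i =>
      if i ≠ ind then PySem.Set.union retval (pvSplit (PySem.List.pyGetD zoos i "")) else retval)
    PySem.Set.empty

def numberUnique (zoos : List String) : Int :=
  (PySem.List.pyRange 0 (PySem.List.len zoos)).foldl
    (fun count i =>
      let test_set := createSet zoos i
      let temp_set := PySem.Set.union test_set (pvSplit (PySem.List.pyGetD zoos i ""))
      if PySem.Set.len test_set ≠ PySem.Set.len temp_set then count + 1 else count)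
    0

-- ===== PORT B =====
def pvCounts (zoos : List String) : PySem.Dict String Int :=
  zoos.foldl
    (fun d z => (PySem.Set.ofList (pvSplit z)).foldl (fun d a => d.insert a (d.getD a 0 + 1)) d)
    PySem.Dict.empty

def numberUnique_alt (zoos : List String) : Int :=
  let counts := pvCounts zoos
  zoos.foldl
    (fun total z => if (pvSplit z).any (fun a => counts.getD a 0 == 1) then total + 1 else total)
    0

-- ===== PRECONDITION & SPEC =====
def Spec_numberUnique (zoos : List String) (out : Int) : Prop := out = numberUnique_alt zoos
instance (zoos : List String) (out : Int) : Decidable (Spec_numberUnique zoos out) := by unfold Spec_numberUnique; infer_instance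

-- ===== CLAIM (what is proved, stated in full; the proofs are below) =====
def Claim_equal_numberUnique : Prop := ∀ (zoos : List String), Dom_numberUnique zoos → Spec_numberUnique zoos (numberUnique zoos)

-- ===== LEMMAS AND PROOFS =====

-- t is a prefix of t ∪ l (Set.union only appends fresh elements)
theorem pvUnion_prefix (t : PySem.Set String) (l : List String) : t <+: PySem.Set.union t l := by
  induction l generalizing t with
  | nil => exact List.prefix_refl t
  | cons x xs ih =>
      refine List.IsPrefix.trans ?_ (ih (PySem.Set.add t x))
      unfold PySem.Set.add
      split
      · exact List.prefix_refl t
      · exact List.prefix_append t [x]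

theorem pvUnion_eq_self_iff (t : PySem.Set String) (l : List String) :
    PySem.Set.union t l = t ↔ ∀ a ∈ l, a ∈ t := by
  constructor
  · intro h a ha
    have : a ∈ PySem.Set.union t l := (PySem.Set.mem_union t l a).2 (Or.inr ha)
    rwa [h] at this
  · intro h
    induction l generalizing t with
    | nil => rfl
    | cons x xs ih =>
        have hx : PySem.Set.add t x = t := by
          unfold PySem.Set.add
          rw [if_pos]
          rw [PySem.Set.contains_iff]
          exact h x (by simp)
        show PySem.Set.union (PySem.Set.add t x) xs = t
        rw [hx]
        exact ih t (fun a ha => h a (by simp [ha]))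

-- A's length test: len t ≠ len (t ∪ l) iff some element of l is missing from t
theorem pvLen_union_ne_iff (t : PySem.Set String) (l : List String) :
    PySem.Set.len t ≠ PySem.Set.len (PySem.Set.union t l) ↔ ∃ a ∈ l, a ∉ t := by
  simp only [PySem.Set.len]
  constructor
  · intro h
    by_contra hc
    push Not at hc
    have := (pvUnion_eq_self_iff t l).2 hc
    rw [this] at h
    exact h rfl
  · intro ⟨a, hal, hat⟩ h
    have hlen : t.length = (PySem.Set.union t l).length := by exact_mod_cast h
    have heq := (pvUnion_prefix t l).eq_of_length hlen
    have : a ∈ PySem.Set.union t l := (PySem.Set.mem_union t l a).2 (Or.inr hal)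
    rw [heq] at hat
    exact hat this

-- membership in createSet: a occurs in the split of some zoo with index ≠ ind
theorem pvMem_createSet (zoos : List String) (ind : Int) (a : String) :
    a ∈ createSet zoos ind ↔
      ∃ j ∈ PySem.List.pyRange 0 (PySem.List.len zoos), j ≠ ind ∧ a ∈ pvSplit (PySem.List.pyGetD zoos j "") := by
  unfold createSet
  generalize PySem.List.pyRange 0 (PySem.List.len zoos) = rng
  have gen : ∀ (l : List Int) (s0 : PySem.Set String),
      a ∈ l.foldl (fun retval i =>
          if i ≠ ind then PySem.Set.union retval (pvSplit (PySem.List.pyGetD zoos i "")) else retval) s0 ↔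
        a ∈ s0 ∨ ∃ j ∈ l, j ≠ ind ∧ a ∈ pvSplit (PySem.List.pyGetD zoos j "") := by
    intro l
    induction l with
    | nil => simp
    | cons x xs ih =>
        intro s0
        simp only [List.foldl_cons]
        by_cases hx : x = ind
        · rw [if_neg (by simp [hx]), ih]
          constructor
          · rintro (h | ⟨j, hj, hji, hja⟩)
            · exact Or.inl h
            · exact Or.inr ⟨j, List.mem_cons_of_mem _ hj, hji, hja⟩
          · rintro (h | ⟨j, hj, hji, hja⟩)
            · exact Or.inl h
            · rcases List.mem_cons.1 hj with rfl | hj'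
              · exact absurd hx hji
              · exact Or.inr ⟨j, hj', hji, hja⟩
        · rw [if_pos hx, ih]
          rw [PySem.Set.mem_union]
          constructor
          · rintro ((h | h) | ⟨j, hj, hji, hja⟩)
            · exact Or.inl h
            · exact Or.inr ⟨x, by simp, hx, h⟩
            · exact Or.inr ⟨j, List.mem_cons_of_mem _ hj, hji, hja⟩
          · rintro (h | ⟨j, hj, hji, hja⟩)
            · exact Or.inl (Or.inl h)
            · rcases List.mem_cons.1 hj with rfl | hj'
              · exact Or.inl (Or.inr hja)
              · exact Or.inr ⟨j, hj', hji, hja⟩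
  rw [gen]
  simp [PySem.Set.empty]

-- B's counter: the stored count of a is the number of zoos whose split contains a
theorem pvCounts_getD (zoos : List String) (a : String) :
    (pvCounts zoos).getD a 0 = (zoos.countP (fun z => decide (a ∈ pvSplit z)) : Int) := by
  unfold pvCounts
  have gen : ∀ (l : List String) (d : PySem.Dict String Int),
      (l.foldl (fun d z => (PySem.Set.ofList (pvSplit z)).foldl
          (fun d a => d.insert a (d.getD a 0 + 1)) d) d).getD a 0 =
        d.getD a 0 + (l.countP (fun z => decide (a ∈ pvSplit z)) : Int) := by
    intro l
    induction l with
    | nil => simp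
    | cons z zs ih =>
        intro d
        simp only [List.foldl_cons]
        rw [ih, PySem.Dict.getD_foldl_insert_add_one]
        rw [List.countP_cons]
        by_cases hz : a ∈ pvSplit z
        · rw [List.count_eq_one_of_mem (PySem.Set.nodup_ofList _) ((PySem.Set.mem_ofList _ _).2 hz)]
          simp only [hz, decide_true, if_pos]
          push_cast
          ring
        · rw [List.count_eq_zero_of_not_mem (fun hc => hz ((PySem.Set.mem_ofList _ _).1 hc))]
          simp only [hz, decide_false]
          push_cast
          ring
  rw [gen]
  simp

-- exactly-one-occurrence: on a nodup list containing i with p i, countP p = 1 iff p fails elsewhere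
theorem pvCountP_eq_one_iff {l : List Int} {p : Int → Bool} {i : Int}
    (hnd : l.Nodup) (hil : i ∈ l) (hpi : p i = true) :
    l.countP p = 1 ↔ ∀ j ∈ l, j ≠ i → p j = false := by
  constructor
  · intro h j hjl hji
    by_contra hc
    have hpj : p j = true := by simpa using hc
    have hsub : [i, j] ⊆ l.filter p := by
      intro x hx
      rcases List.mem_cons.1 hx with rfl | hx
      · exact List.mem_filter.2 ⟨hil, hpi⟩
      · simp at hx
        subst hx
        exact List.mem_filter.2 ⟨hjl, hpj⟩
    have hnd2 : ([i, j] : List Int).Nodup := by simp [Ne.symm hji]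
    have h2 : 2 ≤ (l.filter p).length := by simpa using (hnd2.subperm hsub).length_le
    rw [List.countP_eq_length_filter] at h
    omega
  · intro h
    have hfil : l.filter p = [i] := by
      have hmem : ∀ x ∈ l.filter p, x = i := by
        intro x hx
        have ⟨hxl, hpx⟩ := List.mem_filter.1 hx
        by_contra hxi
        rw [h x hxl hxi] at hpx
        exact absurd hpx (by simp)
      have hif : i ∈ l.filter p := List.mem_filter.2 ⟨hil, hpi⟩
      match hf : l.filter p with
      | [] => rw [hf] at hif; exact absurd hif (by simp)
      | [x] => rw [hf] at hmem; rw [hmem x (by simp)]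
      | x :: y :: t =>
          exfalso
          have hx := hmem x (by rw [hf]; simp)
          have hy := hmem y (by rw [hf]; simp)
          have := hnd.filter p
          rw [hf] at this
          simp [hx, hy] at this
    rw [List.countP_eq_length_filter, hfil]
    rfl

theorem pvRange_nodup (n : Nat) : (PySem.List.pyRange 0 (n : Int)).Nodup := by
  rw [PySem.List.pyRange_zero_natCast]
  exact (List.nodup_range).map (fun a b => by exact_mod_cast id)

-- counting over the zoos list equals counting over its index range
theorem pvCountP_index (zoos : List String) (p : String → Bool) :
    zoos.countP p =
      (PySem.List.pyRange 0 (PySem.List.len zoos)).countP (fun j => p (PySem.List.pyGetD zoos j "")) := by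
  conv_lhs => rw [← PySem.List.map_pyGetD_pyRange_zero zoos ""]
  rw [List.countP_map]
  rfl

-- the per-zoo conditions of A and B agree at every index
theorem pvCond_eq (zoos : List String) (i : Int) (hi : i ∈ PySem.List.pyRange 0 (PySem.List.len zoos)) :
    (decide (PySem.Set.len (createSet zoos i) ≠
        PySem.Set.len (PySem.Set.union (createSet zoos i) (pvSplit (PySem.List.pyGetD zoos i ""))))) =
      (pvSplit (PySem.List.pyGetD zoos i "")).any (fun a => (pvCounts zoos).getD a 0 == 1) := by
  have hnd : (PySem.List.pyRange 0 (PySem.List.len zoos)).Nodup := by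
    unfold PySem.List.len
    exact pvRange_nodup zoos.length
  apply Bool.coe_iff_coe.1
  rw [decide_eq_true_iff, List.any_eq_true, pvLen_union_ne_iff]
  constructor
  · rintro ⟨a, ha, hna⟩
    refine ⟨a, ha, ?_⟩
    rw [pvCounts_getD, pvCountP_index zoos (fun z => decide (a ∈ pvSplit z))]
    have h1 : (PySem.List.pyRange 0 (PySem.List.len zoos)).countP
        (fun j => decide (a ∈ pvSplit (PySem.List.pyGetD zoos j ""))) = 1 := by
      rw [pvCountP_eq_one_iff hnd hi (by simp [ha])]
      intro j hjl hji
      simp only [decide_eq_false_iff_not]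
      intro hja
      exact hna ((pvMem_createSet zoos i a).2 ⟨j, hjl, hji, hja⟩)
    rw [h1]
    rfl
  · rintro ⟨a, ha, hc⟩
    refine ⟨a, ha, ?_⟩
    rw [pvCounts_getD, pvCountP_index zoos (fun z => decide (a ∈ pvSplit z))] at hc
    have h1 : (PySem.List.pyRange 0 (PySem.List.len zoos)).countP
        (fun j => decide (a ∈ pvSplit (PySem.List.pyGetD zoos j ""))) = 1 := by
      exact_mod_cast beq_iff_eq.1 hc
    intro hmem
    rcases (pvMem_createSet zoos i a).1 hmem with ⟨j, hjl, hji, hja⟩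
    have hfalse := (pvCountP_eq_one_iff hnd hi (by simp [ha])).1 h1 j hjl hji
    simp [hja] at hfalse

-- ===== VERDICT (by name: the statement is the Claim_ definition above) =====
theorem numberUnique_spec : Claim_equal_numberUnique := by
  intro zoos _
  unfold Spec_numberUnique numberUnique numberUnique_alt
  rw [PySem.List.foldl_ite_add_one
      (p := fun i => PySem.Set.len (createSet zoos i) ≠
        PySem.Set.len (PySem.Set.union (createSet zoos i) (pvSplit (PySem.List.pyGetD zoos i ""))))]
  rw [PySem.List.foldl_if_add_one
      (p := fun z => (pvSplit z).any (fun a => (pvCounts zoos).getD a 0 == 1))]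
  rw [pvCountP_index zoos (fun z => (pvSplit z).any (fun a => (pvCounts zoos).getD a 0 == 1))]
  congr 2
  exact List.countP_congr (fun i hi => by rw [pvCond_eq zoos i hi])
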